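-- pv_equiv track=rewrite | github.com/BapanmLdL/Python-Project | list_searching_sorting/main.py | longest_even_odd_subarray
-- ===== SOURCE A (Python) =====
-- def longest_even_odd_subarray(arr):
--     res = 1
--     curr = 1
--
--     for i in range(1, len(arr)):
--
--         if (arr[i] % 2 == 0 and arr[i-1] % 2 == 0) or (arr[i] % 2 != 0 and arr[i-1] % 2 != 0):
--             curr += 1
--             res = max(curr, res)
--
--         else:
--             curr = 1
--
--     return res
-- ===== SOURCE B (Python) =====
-- def longest_even_odd_subarray(arr):
--     # Staged passes: (1) list the cut positions where adjacent parities differ,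
--     # (2) bracket them with the array's ends, (3) the answer is the largest gap
--     # between consecutive boundaries. No running counter, no reset.
--     n = len(arr)
--     if n < 2:
--         return 1
--     cuts = [i for i, (x, y) in enumerate(zip(arr, arr[1:]), 1) if x % 2 != y % 2]
--     bounds = [0] + cuts + [n]
--     return max(b - a for a, b in zip(bounds, bounds[1:]))
-- ===== Notes on version B (the rewrite author's own statement) =====
-- stated objective: alternative
-- what changed: Replaces A's single-pass counter-with-reset by staged passes: build the list of parity-change cut positions, bracket it with the array ends, and return the largest gap between consecutive boundaries.
import Mathlib
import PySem

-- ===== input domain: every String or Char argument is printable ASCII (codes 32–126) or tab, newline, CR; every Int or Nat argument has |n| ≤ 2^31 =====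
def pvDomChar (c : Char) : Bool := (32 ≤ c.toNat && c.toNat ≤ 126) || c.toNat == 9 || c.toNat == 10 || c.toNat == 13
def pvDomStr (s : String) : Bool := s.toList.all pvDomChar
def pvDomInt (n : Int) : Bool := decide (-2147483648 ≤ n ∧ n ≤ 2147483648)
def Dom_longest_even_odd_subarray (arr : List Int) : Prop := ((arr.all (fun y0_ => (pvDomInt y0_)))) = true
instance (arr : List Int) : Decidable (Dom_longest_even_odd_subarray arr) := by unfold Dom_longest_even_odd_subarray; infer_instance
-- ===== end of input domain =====

-- B replaces A's running counter-with-reset by staged passes: list the parity-change cut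
-- positions, bracket them with the array ends, return the largest boundary gap (alternative
-- decomposition, same O(n) cost); return values proved equal.

-- ===== PORT A =====
-- literal port of A: res=curr=1; for i in range(1, len(arr)): test parities of arr[i], arr[i-1]
def longest_even_odd_subarray (arr : List Int) : Int :=
  ((PySem.List.pyRange 1 (PySem.List.len arr) 1).foldl
    (fun (s : Int × Int) (i : Int) =>
      if (PySem.Int.mod (PySem.List.pyGetD arr i 0) 2 == 0 && PySem.Int.mod (PySem.List.pyGetD arr (i-1) 0) 2 == 0)
         || (PySem.Int.mod (PySem.List.pyGetD arr i 0) 2 != 0 && PySem.Int.mod (PySem.List.pyGetD arr (i-1) 0) 2 != 0)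
      then (max (s.2 + 1) s.1, s.2 + 1)
      else (s.1, 1))
    (1, 1)).1

-- ===== PORT B =====
-- literal port of Source B: cut positions via enumerate(zip(arr, arr[1:]), 1), bracketed bounds,
-- then Python's max over the gaps (the gap list is provably nonempty when len arr ≥ 2)
def longest_even_odd_subarray_alt (arr : List Int) : Int :=
  if PySem.List.len arr < 2 then 1
  else
    let cuts := ((PySem.List.enumerate (arr.zip (PySem.List.slice arr (some 1) none)) 1).filter
        (fun p => PySem.Int.mod p.2.1 2 != PySem.Int.mod p.2.2 2)).map (fun p => p.1)
    let bounds := 0 :: cuts ++ [PySem.List.len arr]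
    ((PySem.List.max? ((bounds.zip bounds.tail).map (fun p => p.2 - p.1)) (fun y => y)).getD 1)

-- ===== PRECONDITION & SPEC =====
def Spec_longest_even_odd_subarray (arr : List Int) (out : Int) : Prop := out = longest_even_odd_subarray_alt arr
instance (arr : List Int) (out : Int) : Decidable (Spec_longest_even_odd_subarray arr out) := by unfold Spec_longest_even_odd_subarray; infer_instance

-- ===== CLAIM (what is proved, stated in full; the proofs are below) =====
def Claim_equal_longest_even_odd_subarray : Prop := ∀ (arr : List Int), Dom_longest_even_odd_subarray arr → Spec_longest_even_odd_subarray arr (longest_even_odd_subarray arr)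

-- ===== LEMMAS AND PROOFS =====

-- A's loop as a structural recursion over the elements, carrying the previous element
def runFold (res curr p : Int) : List Int → Int
  | [] => res
  | x :: xs =>
    if PySem.Int.mod x 2 = PySem.Int.mod p 2 then runFold (max (curr + 1) res) (curr + 1) x xs
    else runFold res 1 x xs

-- lengths of the maximal same-parity runs of p::xs, the current run having length curr so far
def runs (curr p : Int) : List Int → List Int
  | [] => [curr]
  | x :: xs =>
    if PySem.Int.mod x 2 = PySem.Int.mod p 2 then runs (curr + 1) x xs
    else curr :: runs 1 x xs

-- B's cut positions, structurally: positions k, k+1, … where the parity changes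
def cutF (k p : Int) : List Int → List Int
  | [] => []
  | x :: xs =>
    if PySem.Int.mod x 2 = PySem.Int.mod p 2 then cutF (k + 1) x xs
    else k :: cutF (k + 1) x xs

-- adjacent differences, as Source B computes them
def diffs (l : List Int) : List Int := (l.zip l.tail).map (fun p => p.2 - p.1)

-- A's two-sided parity test is the same-parity test
theorem cond_iff (a b : Int) :
    ((PySem.Int.mod b 2 == 0 && PySem.Int.mod a 2 == 0)
      || (PySem.Int.mod b 2 != 0 && PySem.Int.mod a 2 != 0)) = true
      ↔ PySem.Int.mod b 2 = PySem.Int.mod a 2 := by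
  rcases PySem.Int.mod_two_eq a with ha | ha <;> rcases PySem.Int.mod_two_eq b with hb | hb <;>
    simp only [ha, hb] <;> decide

def pairStep (s : Int × Int) (pr : Int × Int) : Int × Int :=
  if PySem.Int.mod pr.2 2 = PySem.Int.mod pr.1 2 then (max (s.2 + 1) s.1, s.2 + 1) else (s.1, 1)

-- the indices 1..n-1 read as (arr[i-1], arr[i]) are the adjacent pairs of arr
theorem map_range_eq (arr : List Int) :
    (PySem.List.pyRange 1 (PySem.List.len arr) 1).map
      (fun i => (PySem.List.pyGetD arr (i - 1) 0, PySem.List.pyGetD arr i 0))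
      = arr.zip arr.tail := by
  apply List.ext_getElem
  · simp only [List.length_map, PySem.List.length_pyRange_one, PySem.List.len_eq,
      List.length_zip, List.length_tail]
    omega
  · intro k h1 h2
    simp only [List.length_map, PySem.List.length_pyRange_one, PySem.List.len_eq] at h1
    have hk1 : k + 1 < arr.length := by omega
    simp only [List.getElem_map, PySem.List.getElem_pyRange_one, List.getElem_zip,
      List.getElem_tail]
    have e1 : (1 : Int) + (k : Int) - 1 = ((k : Nat) : Int) := by omega
    have e2 : (1 : Int) + (k : Int) = (((k + 1 : Nat)) : Int) := by push_cast; omega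
    rw [e1, e2, PySem.List.pyGetD_natCast, PySem.List.pyGetD_natCast,
      List.getD_eq_getElem _ _ (by omega), List.getD_eq_getElem _ _ hk1]

-- A's fold over the adjacent pairs is runFold
theorem foldl_pairStep_runFold (xs : List Int) : ∀ (p res curr : Int),
    (((p :: xs).zip xs).foldl pairStep (res, curr)).1 = runFold res curr p xs := by
  induction xs with
  | nil => intro p res curr; rfl
  | cons x xs ih =>
    intro p res curr
    by_cases h : PySem.Int.mod x 2 = PySem.Int.mod p 2
    · simp only [List.zip_cons_cons, List.foldl_cons, pairStep, runFold, if_pos h]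
      exact ih x _ _
    · simp only [List.zip_cons_cons, List.foldl_cons, pairStep, runFold, if_neg h]
      exact ih x _ _

theorem A_eq_runFold (a : Int) (l : List Int) :
    longest_even_odd_subarray (a :: l) = runFold 1 1 a l := by
  rw [longest_even_odd_subarray]
  have hb : ∀ (s : Int × Int) (i : Int),
      (if (PySem.Int.mod (PySem.List.pyGetD (a :: l) i 0) 2 == 0
            && PySem.Int.mod (PySem.List.pyGetD (a :: l) (i - 1) 0) 2 == 0)
          || (PySem.Int.mod (PySem.List.pyGetD (a :: l) i 0) 2 != 0
            && PySem.Int.mod (PySem.List.pyGetD (a :: l) (i - 1) 0) 2 != 0)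
        then (max (s.2 + 1) s.1, s.2 + 1) else (s.1, 1))
        = pairStep s (PySem.List.pyGetD (a :: l) (i - 1) 0, PySem.List.pyGetD (a :: l) i 0) := by
    intro s i
    by_cases h : PySem.Int.mod (PySem.List.pyGetD (a :: l) i 0) 2
        = PySem.Int.mod (PySem.List.pyGetD (a :: l) (i - 1) 0) 2
    · rw [pairStep, if_pos ((cond_iff _ _).mpr h), if_pos h]
    · rw [pairStep, if_neg (fun hh => h ((cond_iff _ _).mp hh)), if_neg h]
  simp only [hb]
  rw [← List.foldl_map, map_range_eq]
  exact foldl_pairStep_runFold l a 1 1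

-- runs is nonempty and its head is at least the carried current length
theorem runs_head (xs : List Int) : ∀ (curr p : Int),
    ∃ h t, runs curr p xs = h :: t ∧ curr ≤ h := by
  induction xs with
  | nil => intro curr p; exact ⟨curr, [], rfl, le_rfl⟩
  | cons x xs ih =>
    intro curr p
    by_cases hp : PySem.Int.mod x 2 = PySem.Int.mod p 2
    · obtain ⟨h, t, he, hle⟩ := ih (curr + 1) x
      exact ⟨h, t, by rw [runs, if_pos hp]; exact he, by omega⟩
    · exact ⟨curr, runs 1 x xs, by rw [runs, if_neg hp], le_rfl⟩

-- A's counter loop computes the running max over the run lengths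
theorem runFold_eq_foldl_max (xs : List Int) : ∀ (res curr p : Int),
    1 ≤ curr → curr ≤ res →
    runFold res curr p xs = (runs curr p xs).foldl max res := by
  induction xs with
  | nil =>
    intro res curr p h1 h2
    simp only [runFold, runs, List.foldl_cons, List.foldl_nil]
    omega
  | cons x xs ih =>
    intro res curr p h1 h2
    by_cases hp : PySem.Int.mod x 2 = PySem.Int.mod p 2
    · rw [runFold, if_pos hp, runs, if_pos hp, ih _ _ _ (by omega) (le_max_left _ _)]
      obtain ⟨h, t, he, hle⟩ := runs_head xs (curr + 1) x
      rw [he]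
      simp only [List.foldl_cons]
      congr 1
      omega
    · rw [runFold, if_neg hp, runs, if_neg hp, ih _ _ _ le_rfl (by omega)]
      simp only [List.foldl_cons]
      congr 1
      omega

-- B's comprehension over enumerate(zip(arr, arr[1:]), 1) is cutF
theorem cuts_eq (xs : List Int) : ∀ (p : Int) (k : Int),
    (((PySem.List.enumerate ((p :: xs).zip xs) k).filter
        (fun q => PySem.Int.mod q.2.1 2 != PySem.Int.mod q.2.2 2)).map (fun q => q.1))
      = cutF k p xs := by
  induction xs with
  | nil => intro p k; rfl
  | cons x xs ih =>
    intro p k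
    rw [List.zip_cons_cons, PySem.List.enumerate_cons]
    by_cases hp : PySem.Int.mod x 2 = PySem.Int.mod p 2
    · rw [List.filter_cons_of_neg
        (by simp only [bne_iff_ne, ne_eq, Decidable.not_not]; exact hp.symm), cutF, if_pos hp]
      exact ih x (k + 1)
    · rw [List.filter_cons_of_pos
        (by simp only [bne_iff_ne, ne_eq]; exact fun hh => hp hh.symm), List.map_cons,
        cutF, if_neg hp]
      exact congrArg _ (ih x (k + 1))

-- the boundary gaps are exactly the run lengths
theorem diffs_cons₂ (a b : Int) (l : List Int) :
    diffs (a :: b :: l) = (b - a) :: diffs (b :: l) := by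
  simp [diffs]

theorem diffs_eq_runs (xs : List Int) : ∀ (p k prev : Int),
    diffs (prev :: (cutF k p xs ++ [k + (xs.length : Int)])) = runs (k - prev) p xs := by
  induction xs with
  | nil =>
    intro p k prev
    simp only [cutF, List.nil_append, List.length_nil, Int.natCast_zero, Int.add_zero]
    rw [diffs_cons₂]
    rfl
  | cons x xs ih =>
    intro p k prev
    have e : k + ((x :: xs).length : Int) = (k + 1) + (xs.length : Int) := by
      push_cast [List.length_cons]; ring
    rw [e]
    by_cases hp : PySem.Int.mod x 2 = PySem.Int.mod p 2
    · rw [cutF, if_pos hp, runs, if_pos hp, ih x (k + 1) prev]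
      congr 1
      omega
    · rw [cutF, if_neg hp, runs, if_neg hp, List.cons_append, diffs_cons₂,
        ih x (k + 1) k]
      congr 2
      omega

-- ===== VERDICT (by name: the statement is the Claim_ definition above) =====
theorem longest_even_odd_subarray_spec : Claim_equal_longest_even_odd_subarray := by
  intro arr _
  unfold Spec_longest_even_odd_subarray
  match arr with
  | [] => decide
  | [a] =>
    rw [A_eq_runFold]
    simp [runFold, longest_even_odd_subarray_alt, PySem.List.len_eq]
  | a :: b :: m =>
    rw [A_eq_runFold, longest_even_odd_subarray_alt,
      if_neg (by simp only [PySem.List.len_eq, List.length_cons]; push_cast; omega)]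
    rw [PySem.List.slice_from_one, List.tail_cons]
    rw [cuts_eq (b :: m) a 1]
    have hn : PySem.List.len (a :: b :: m) = 1 + ((b :: m).length : Int) := by
      simp only [PySem.List.len_eq, List.length_cons]; push_cast; omega
    rw [hn]
    show runFold 1 1 a (b :: m)
        = (PySem.List.max? (diffs ((0 : Int) :: (cutF 1 a (b :: m)
            ++ [1 + ((b :: m).length : Int)]))) (fun y => y)).getD 1
    rw [diffs_eq_runs (b :: m) a 1 0]
    norm_num
    obtain ⟨h, t, he, hle⟩ := runs_head (b :: m) 1 a
    rw [runFold_eq_foldl_max _ _ _ _ le_rfl le_rfl, he, PySem.List.max?_id_cons,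
      Option.getD_some]
    simp only [List.foldl_cons]
    congr 1
    omega
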